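-- pv_equiv track=rewrite | github.com/minylora/GhostsOfChristmasPast | Year_2021_Events/day3/day3.py | get_report_count_list
-- ===== SOURCE A (Python) =====
-- from typing import List
--
-- def get_report_count_list(report: List[str]) -> List[int]:
--     max_cols = len(report[0])
--     sum_report = [0] * max_cols
--     for row in report:
--         items = [x for x in row]
--         for col in range(0, max_cols):
--             sum_report[col] += int(items[col])
--     return sum_report
-- ===== SOURCE B (Python) =====
-- from typing import List
--
-- def get_report_count_list(report: List[str]) -> List[int]:
--     # Histogram first: count how often each (column, character) pair occurs,
--     # then fold the counts into per-column totals as weighted digit sums.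
--     max_cols = len(report[0])
--     counts = {}
--     for row in report:
--         for col in range(max_cols):
--             key = (col, row[col])
--             counts[key] = counts.get(key, 0) + 1
--     sums = [0] * max_cols
--     for (col, ch), n in counts.items():
--         sums[col] += int(ch) * n
--     return sums
-- ===== Notes on version B (the rewrite author's own statement) =====
-- stated objective: alternative
-- what changed: Replaces A's row-major accumulation into a mutable sum array with a two-stage histogram algorithm: first build a dictionary counting occurrences of each (column, character) pair, then form each column total as a weighted sum digit*count over the distinct histogram entries.
import Mathlib
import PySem

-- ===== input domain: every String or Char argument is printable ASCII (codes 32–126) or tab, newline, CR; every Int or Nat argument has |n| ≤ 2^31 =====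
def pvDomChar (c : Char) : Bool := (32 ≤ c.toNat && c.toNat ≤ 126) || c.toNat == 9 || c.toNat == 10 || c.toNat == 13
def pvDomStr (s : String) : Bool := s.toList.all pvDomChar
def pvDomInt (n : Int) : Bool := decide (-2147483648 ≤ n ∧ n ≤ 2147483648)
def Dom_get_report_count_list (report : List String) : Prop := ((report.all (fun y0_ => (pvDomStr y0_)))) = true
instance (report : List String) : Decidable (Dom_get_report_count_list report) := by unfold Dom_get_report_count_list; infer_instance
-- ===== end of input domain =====

-- B replaces A's row-major accumulation into a mutable sum array with a two-stage
-- histogram: count each (column, character) pair in a dict, then form each column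
-- total as a weighted sum digit*count over the distinct histogram entries.

-- ===== PORT A =====
-- int(x) for a single character x (Pre_ guarantees x is a digit, where it is exact)
def pvDigit (c : Char) : Int := (PySem.Int.ofStr? (String.ofList [c])).getD 0

-- one step of A's inner loop: sum_report[col] += int(items[col])
def pvStep (items : List Char) (s : List Int) (col : Nat) : List Int :=
  s.set col (s.getD col 0 + pvDigit (items.getD col ' '))

def get_report_count_list (report : List String) : List Int :=
  let max_cols := ((PySem.List.pyGet? report 0).getD "").toList.length
  report.foldl
    (fun sum_report row => (List.range max_cols).foldl (pvStep row.toList) sum_report)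
    (List.replicate max_cols 0)

-- ===== PORT B =====
-- counts[key] = counts.get(key, 0) + 1  for key = (col, row[col])
def pvBKey (row : String) (col : Nat) : Int × Char := ((col : Int), row.toList.getD col ' ')

def pvBCount (d : PySem.Dict (Int × Char) Int) (k : Int × Char) : PySem.Dict (Int × Char) Int :=
  d.insert k (d.getD k 0 + 1)

-- sums[col] += int(ch) * n
def pvBStep (s : List Int) (p : (Int × Char) × Int) : List Int :=
  s.set p.1.1.toNat (s.getD p.1.1.toNat 0 + pvDigit p.1.2 * p.2)

def get_report_count_list_alt (report : List String) : List Int :=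
  let max_cols := ((PySem.List.pyGet? report 0).getD "").toList.length
  let counts := report.foldl
    (fun d row => (List.range max_cols).foldl (fun d col => pvBCount d (pvBKey row col)) d)
    PySem.Dict.empty
  counts.items.foldl pvBStep (List.replicate max_cols 0)

-- ===== PRECONDITION & SPEC =====
-- Pre_ excludes exactly the inputs where Python A raises: the empty list
-- (report[0] → IndexError), a row shorter than len(report[0]) (IndexError),
-- or a non-digit character in the first len(report[0]) columns of a row
-- (int(x) → ValueError).
def Pre_get_report_count_list (report : List String) : Prop :=
  report ≠ [] ∧ ∀ row ∈ report,
    (report.headD "").toList.length ≤ row.toList.length ∧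
    (row.toList.take (report.headD "").toList.length).all
      (fun c => "0123456789".toList.contains c) = true
instance (report : List String) : Decidable (Pre_get_report_count_list report) := by
  unfold Pre_get_report_count_list; infer_instance
def pvWitness_get_report_count_list : List String := ["12", "34"]

def Spec_get_report_count_list (report : List String) (out : List Int) : Prop := out = get_report_count_list_alt report
instance (report : List String) (out : List Int) : Decidable (Spec_get_report_count_list report out) := by unfold Spec_get_report_count_list; infer_instance

-- ===== CLAIM (what is proved, stated in full; the proofs are below) =====
def Claim_equal_get_report_count_list : Prop := ∀ (report : List String), Dom_get_report_count_list report → Pre_get_report_count_list report → Spec_get_report_count_list report (get_report_count_list report)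

-- ===== LEMMAS AND PROOFS =====

-- the flattened list of (column, character) pairs B's histogram counts
def pvPairs (report : List String) (m : Nat) : List (Int × Char) :=
  report.flatMap (fun row => (List.range m).map (pvBKey row))

-- ---------- A side: pointwise characterisation of the accumulation ----------

-- A's inner loop, pointwise: entries below m gain the digit of this row, others unchanged
theorem foldl_range_pvStep_getElem? (items : List Char) :
    ∀ (m : Nat) (s : List Int) (j : Nat),
      ((List.range m).foldl (pvStep items) s)[j]? =
        if j < m then s[j]?.map (fun v => v + pvDigit (items.getD j ' ')) else s[j]? := by
  intro m
  induction m with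
  | zero => intro s j; simp
  | succ m ih =>
    intro s j
    rw [List.range_succ, List.foldl_append]
    simp only [List.foldl_cons, List.foldl_nil]
    set t := (List.range m).foldl (pvStep items) s with ht
    have hjt := ih s j
    have hmt := ih s m
    simp only [Nat.lt_irrefl, if_false] at hmt
    unfold pvStep
    rcases Nat.lt_trichotomy j m with h | h | h
    · rw [List.getElem?_set_ne (by omega)]
      rw [hjt, if_pos h, if_pos (by omega)]
    · subst h
      rw [if_pos (by omega)]
      by_cases hlen : j < t.length
      · rw [List.getElem?_set_self hlen]
        have : t[j]? = s[j]? := hmt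
        have hlen' : j < s.length := by
          have := List.getElem?_eq_getElem hlen
          rw [this] at hmt
          rcases List.getElem?_eq_some_iff.mp hmt.symm with ⟨h', _⟩
          exact h'
        rw [List.getElem?_eq_getElem hlen']
        simp only [Option.map_some]
        congr 1
        have : t.getD j 0 = s[j] := by
          rw [List.getD_eq_getElem?_getD, hmt, List.getElem?_eq_getElem hlen']
          rfl
        rw [this]
      · have hlen2 : t[j]? = none := List.getElem?_eq_none (by omega)
        have hs : s[j]? = none := hmt.symm.trans hlen2
        rw [List.set_eq_of_length_le (by omega), hlen2, hs]; rfl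
    · rw [List.getElem?_set_ne (by omega), hjt, if_neg (by omega), if_neg (by omega)]

-- A's outer loop, pointwise: entries below m gain the column sum over all rows
theorem foldl_rows_getElem? (m : Nat) :
    ∀ (rows : List String) (s : List Int) (j : Nat),
      ((rows.foldl (fun sum_report row => (List.range m).foldl (pvStep row.toList) sum_report) s))[j]? =
        if j < m then
          s[j]?.map (fun v => v + (rows.map (fun row => pvDigit (row.toList.getD j ' '))).sum)
        else s[j]? := by
  intro rows
  induction rows with
  | nil => intro s j; simp
  | cons r rs ih =>
    intro s j
    simp only [List.foldl_cons]
    rw [ih]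
    by_cases h : j < m
    · rw [if_pos h, if_pos h, foldl_range_pvStep_getElem? r.toList m s j, if_pos h,
        Option.map_map]
      simp only [List.map_cons, List.sum_cons]
      cases s[j]? with
      | none => rfl
      | some v => simp only [Option.map_some, Function.comp]; congr 1; ring
    · rw [if_neg h, if_neg h, foldl_range_pvStep_getElem? r.toList m s j, if_neg h]

-- ---------- B side ----------

-- B's histogram loop builds exactly the counter of the flattened pair list
theorem counts_eq_counter (report : List String) (m : Nat) :
    report.foldl
      (fun d row => (List.range m).foldl (fun d col => pvBCount d (pvBKey row col)) d)
      PySem.Dict.empty = PySem.Dict.counter (pvPairs report m) := by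
  rw [← PySem.Dict.foldl_insert_getD_add_one_eq_counter]
  unfold pvPairs
  induction report with
  | nil => rfl
  | cons r rs ih =>
    simp only [List.foldl_cons, List.flatMap_cons, List.foldl_append]
    rw [List.foldl_map]
    -- both sides now fold the tail from the same intermediate dict
    have : ∀ (l : List String) (d : PySem.Dict (Int × Char) Int),
        l.foldl (fun d row => (List.range m).foldl (fun d col => pvBCount d (pvBKey row col)) d) d =
        (l.flatMap (fun row => (List.range m).map (pvBKey row))).foldl pvBCount d := by
      intro l
      induction l with
      | nil => intro d; rfl
      | cons x xs ihx =>
        intro d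
        simp only [List.foldl_cons, List.flatMap_cons, List.foldl_append, List.foldl_map]
        exact ihx _
    rw [this]
    rfl

-- one pvBStep, pointwise
theorem pvBStep_getElem? (s : List Int) (p : (Int × Char) × Int) (j : Nat) :
    (pvBStep s p)[j]? =
      if p.1.1.toNat = j then s[j]?.map (fun v => v + pvDigit p.1.2 * p.2) else s[j]? := by
  unfold pvBStep
  by_cases h : p.1.1.toNat = j
  · subst h
    rw [if_pos rfl]
    by_cases hlen : p.1.1.toNat < s.length
    · rw [List.getElem?_set_self hlen, List.getElem?_eq_getElem hlen]
      simp only [Option.map_some]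
      congr 1
      rw [List.getD_eq_getElem?_getD, List.getElem?_eq_getElem hlen]
      rfl
    · rw [List.set_eq_of_length_le (by omega), List.getElem?_eq_none (by omega)]
      rfl
  · rw [if_neg h, List.getElem?_set_ne h]

-- B's summing loop, pointwise: index j gains the weighted contributions of entries at column j
theorem foldl_pvBStep_getElem? :
    ∀ (items : List ((Int × Char) × Int)) (s : List Int) (j : Nat),
      (items.foldl pvBStep s)[j]? =
        s[j]?.map (fun v =>
          v + (items.map (fun p => if p.1.1.toNat = j then pvDigit p.1.2 * p.2 else 0)).sum) := by
  intro items
  induction items with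
  | nil =>
    intro s j
    simp only [List.foldl_nil, List.map_nil, List.sum_nil]
    cases s[j]? <;> simp
  | cons p ps ih =>
    intro s j
    simp only [List.foldl_cons, List.map_cons, List.sum_cons]
    rw [ih, pvBStep_getElem?]
    by_cases h : p.1.1.toNat = j
    · rw [if_pos h, if_pos h, Option.map_map]
      cases s[j]? with
      | none => rfl
      | some v => simp only [Option.map_some, Function.comp]; congr 1; ring
    · rw [if_neg h, if_neg h]
      cases s[j]? with
      | none => rfl
      | some v => simp only [Option.map_some]; congr 1; ring

-- each entry of the indicator map over a nodup list is zero except at x, whose entry is f x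
theorem sum_map_indicator {α : Type} [DecidableEq α] (f : α → Int) (x : α) :
    ∀ (K : List α), K.Nodup → x ∈ K →
      (K.map (fun k => if k = x then f k else 0)).sum = f x := by
  intro K
  induction K with
  | nil => intro _ h; cases h
  | cons y ys ih =>
    intro hnd hmem
    simp only [List.map_cons, List.sum_cons]
    rcases List.mem_cons.mp hmem with h | h
    · subst h
      rw [if_pos rfl]
      have hz : (ys.map (fun k => if k = x then f k else 0)).sum = 0 := by
        apply List.sum_eq_zero
        intro z hz
        rcases List.mem_map.mp hz with ⟨k, hk, hkz⟩
        have : k ≠ x := by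
          intro he; subst he; exact (List.nodup_cons.mp hnd).1 hk
        rw [← hkz, if_neg this]
      rw [hz, add_zero]
    · have hy : y ≠ x := by
        intro he; subst he; exact (List.nodup_cons.mp hnd).1 h
      rw [if_neg hy, ih (List.nodup_cons.mp hnd).2 h, zero_add]

-- regrouping: summing f over a nodup key list weighted by multiplicities in P
-- equals summing f directly over P
theorem sum_map_count {α : Type} [BEq α] [LawfulBEq α] [DecidableEq α] (f : α → Int) :
    ∀ (P K : List α), K.Nodup → (∀ x ∈ P, x ∈ K) →
      (K.map (fun k => f k * (P.count k : Int))).sum = (P.map f).sum := by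
  intro P
  induction P with
  | nil =>
    intro K _ _
    simp
  | cons x P' ih =>
    intro K hnd hmem
    have hx : x ∈ K := hmem x List.mem_cons_self
    have hstep : (K.map (fun k => f k * ((x :: P').count k : Int))).sum =
        (K.map (fun k => f k * (P'.count k : Int))).sum +
        (K.map (fun k => if k = x then f k else 0)).sum := by
      rw [← List.sum_map_add]
      apply congrArg
      apply List.map_congr_left
      intro k _
      rw [List.count_cons]
      by_cases h : k = x
      · subst h; simp; ring
      · have hxk : ¬ x = k := fun he => h he.symm
        simp [h, hxk]
    rw [hstep, sum_map_indicator f x K hnd hx,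
        ih K hnd (fun z hz => hmem z (List.mem_cons_of_mem x hz))]
    simp only [List.map_cons, List.sum_cons]
    ring

-- sum over a flatMap is the sum of the per-element sums
theorem sum_flatMap' {α : Type} (g : α → List Int) (l : List α) :
    (l.flatMap g).sum = (l.map (fun a => (g a).sum)).sum := by
  induction l with
  | nil => simp
  | cons a l ih => simp only [List.flatMap_cons, List.sum_append, List.map_cons, List.sum_cons, ih]

-- the indicator sum over range m picks out position j
theorem sum_range_indicator (t : Nat → Int) :
    ∀ (m j : Nat),
      ((List.range m).map (fun c => if c = j then t c else 0)).sum =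
        if j < m then t j else 0 := by
  intro m
  induction m with
  | zero => intro j; simp
  | succ m ih =>
    intro j
    rw [List.range_succ, List.map_append, List.sum_append, ih]
    rcases Nat.lt_trichotomy j m with h | h | h
    · rw [if_pos h, if_pos (by omega)]
      simp [Nat.ne_of_gt h]
    · subst h
      simp
    · rw [if_neg (by omega), if_neg (by omega)]
      simp [Nat.ne_of_lt h]

-- the per-index weighted histogram sum equals the direct column sum
theorem histogram_sum_eq (report : List String) (m j : Nat) (hj : j < m) :
    (((PySem.Dict.counter (pvPairs report m)).items).map
        (fun p => if p.1.1.toNat = j then pvDigit p.1.2 * p.2 else 0)).sum =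
      (report.map (fun row => pvDigit (row.toList.getD j ' '))).sum := by
  rw [PySem.Dict.items_counter, List.map_map]
  have h1 : (((PySem.Set.ofList (pvPairs report m)).map
      ((fun p : (Int × Char) × Int => if p.1.1.toNat = j then pvDigit p.1.2 * p.2 else 0) ∘
        (fun k => (k, ((pvPairs report m).count k : Int))))).sum) =
      (((PySem.Set.ofList (pvPairs report m)).map
      (fun k => (if k.1.toNat = j then pvDigit k.2 else 0) * ((pvPairs report m).count k : Int))).sum) := by
    apply congrArg
    apply List.map_congr_left
    intro k _
    by_cases h : k.1.toNat = j <;> simp [Function.comp, h]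
  rw [h1]
  rw [sum_map_count (fun k : Int × Char => if k.1.toNat = j then pvDigit k.2 else 0)
      (pvPairs report m) (PySem.Set.ofList (pvPairs report m))
      (PySem.Set.nodup_ofList _) (fun x hx => (PySem.Set.mem_ofList _ _).mpr hx)]
  unfold pvPairs
  rw [List.map_flatMap, sum_flatMap']
  apply congrArg
  apply List.map_congr_left
  intro row _
  rw [List.map_map]
  have : ((fun k : Int × Char => if k.1.toNat = j then pvDigit k.2 else 0) ∘ pvBKey row) =
      (fun c : Nat => if c = j then pvDigit (row.toList.getD c ' ') else 0) := by
    funext c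
    unfold pvBKey
    simp
  rw [this, sum_range_indicator (fun c => pvDigit (row.toList.getD c ' ')) m j, if_pos hj]

-- ---------- main equality ----------

theorem get_report_count_list_eq (report : List String) :
    get_report_count_list report = get_report_count_list_alt report := by
  simp only [get_report_count_list, get_report_count_list_alt]
  generalize ((PySem.List.pyGet? report 0).getD "").toList.length = m
  rw [counts_eq_counter report m]
  apply List.ext_getElem?
  intro j
  rw [foldl_rows_getElem? m report (List.replicate m 0) j,
      foldl_pvBStep_getElem? ((PySem.Dict.counter (pvPairs report m)).items) (List.replicate m 0) j]
  by_cases h : j < m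
  · rw [if_pos h, List.getElem?_replicate, if_pos h]
    simp only [Option.map_some]
    rw [histogram_sum_eq report m j h]
  · rw [if_neg h, List.getElem?_replicate, if_neg h]
    rfl

-- ===== VERDICT (by name: the statement is the Claim_ definition above) =====
theorem get_report_count_list_spec : Claim_equal_get_report_count_list := by
  intro report _ _
  exact get_report_count_list_eq report
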